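-- pv_equiv track=rewrite | github.com/ZXZ12310304/wardlung-compass | src/ui/nurse_app.py | _format_last_mar
-- ===== SOURCE A (Python) =====
-- def _format_last_mar(meds: list) -> str:
--     if not meds:
--         return "---"
--     statuses = {str(m.get("status") or "").lower() for m in meds}
--     if "delayed" in statuses or "refused" in statuses:
--         return "Needs follow-up"
--     if "due" in statuses or "pending" in statuses:
--         return "Due now"
--     return "Done"
-- ===== SOURCE B (Python) =====
-- def _format_last_mar(meds: list) -> str:
--     if not meds:
--         return "---"
--     p = 0
--     for m in meds:
--         s = str(m.get("status") or "").lower()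
--         if s in ("delayed", "refused"):
--             q = 2
--         elif s in ("due", "pending"):
--             q = 1
--         else:
--             q = 0
--         if q > p:
--             p = q
--     if p == 2:
--         return "Needs follow-up"
--     if p == 1:
--         return "Due now"
--     return "Done"
-- ===== Notes on version B (the rewrite author's own statement) =====
-- stated objective: alternative
-- what changed: Replaces the set comprehension plus chained membership tests by a single pass maintaining a running maximum severity (delayed/refused=2, due/pending=1, other=0) and one final branch on that scalar.
import Mathlib
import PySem

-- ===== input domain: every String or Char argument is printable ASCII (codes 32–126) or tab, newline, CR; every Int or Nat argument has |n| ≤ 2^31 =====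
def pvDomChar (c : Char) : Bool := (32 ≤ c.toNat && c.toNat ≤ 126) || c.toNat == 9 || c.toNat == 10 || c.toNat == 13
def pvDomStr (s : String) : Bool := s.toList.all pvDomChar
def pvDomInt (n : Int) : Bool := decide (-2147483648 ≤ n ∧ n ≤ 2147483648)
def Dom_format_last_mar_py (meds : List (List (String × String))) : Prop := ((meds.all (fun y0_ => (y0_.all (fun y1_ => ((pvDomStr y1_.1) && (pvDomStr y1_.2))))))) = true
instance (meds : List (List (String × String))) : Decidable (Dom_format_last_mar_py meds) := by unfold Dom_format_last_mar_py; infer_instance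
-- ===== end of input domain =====

-- B replaces A's set of statuses + chained membership tests by a single running-max severity scalar; same O(n) cost, alternative structure.


-- ===== PORT A =====
-- str(m.get("status") or "").lower() : None and "" both become "", then lowercased
def pvStatus (m : List (String × String)) : String :=
  PySem.Str.lower (((PySem.Dict.mk m).get? "status").getD "")

def format_last_mar_py (meds : List (List (String × String))) : String :=
  if meds = [] then "---"
  else
    let statuses : PySem.Set String := PySem.Set.ofList (meds.map pvStatus)
    if PySem.Set.contains statuses "delayed" || PySem.Set.contains statuses "refused" then
      "Needs follow-up"
    else if PySem.Set.contains statuses "due" || PySem.Set.contains statuses "pending" then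
      "Due now"
    else "Done"

-- ===== PORT B =====
def pvPrio (s : String) : Nat :=
  if s = "delayed" || s = "refused" then 2
  else if s = "due" || s = "pending" then 1
  else 0

def format_last_mar_py_alt (meds : List (List (String × String))) : String :=
  if meds = [] then "---"
  else
    let p := meds.foldl (fun acc m => max acc (pvPrio (pvStatus m))) 0
    if p = 2 then "Needs follow-up"
    else if p = 1 then "Due now"
    else "Done"

-- ===== PRECONDITION & SPEC =====
def Spec_format_last_mar_py (meds : List (List (String × String))) (out : String) : Prop := out = format_last_mar_py_alt meds
instance (meds : List (List (String × String))) (out : String) : Decidable (Spec_format_last_mar_py meds out) := by unfold Spec_format_last_mar_py; infer_instance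

-- ===== CLAIM (what is proved, stated in full; the proofs are below) =====
def Claim_equal_format_last_mar_py : Prop := ∀ (meds : List (List (String × String))), Dom_format_last_mar_py meds → Spec_format_last_mar_py meds (format_last_mar_py meds)

-- ===== LEMMAS AND PROOFS =====

-- running max with a seed equals max of seed and the fold from 0
theorem pv_fold_seed (l : List String) (n : Nat) :
    l.foldl (fun acc s => max acc (pvPrio s)) n
      = max n (l.foldl (fun acc s => max acc (pvPrio s)) 0) := by
  induction l generalizing n with
  | nil => simp
  | cons x xs ih =>
    simp only [List.foldl_cons]
    rw [ih, ih (max 0 (pvPrio x))]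
    omega

theorem pv_prio_two (s : String) : pvPrio s = 2 ↔ (s = "delayed" ∨ s = "refused") := by
  unfold pvPrio
  by_cases hd : s = "delayed" <;> by_cases hr : s = "refused" <;>
    by_cases hu : s = "due" <;> by_cases hp : s = "pending" <;> simp_all

theorem pv_prio_one (s : String) : pvPrio s = 1 ↔ (s = "due" ∨ s = "pending") := by
  unfold pvPrio
  by_cases hd : s = "delayed" <;> by_cases hr : s = "refused" <;>
    by_cases hu : s = "due" <;> by_cases hp : s = "pending" <;> simp_all

theorem pv_exists_cons (x : String) (xs : List String) (n : Nat) :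
    (∃ s ∈ x :: xs, pvPrio s = n) ↔ pvPrio x = n ∨ ∃ s ∈ xs, pvPrio s = n := by
  constructor
  · rintro ⟨s, hs, hp⟩
    rcases List.mem_cons.mp hs with rfl | hs
    · exact Or.inl hp
    · exact Or.inr ⟨s, hs, hp⟩
  · rintro (hp | ⟨s, hs, hp⟩)
    · exact ⟨x, List.mem_cons_self, hp⟩
    · exact ⟨s, List.mem_cons_of_mem _ hs, hp⟩

theorem pv_fold_char (l : List String) :
    l.foldl (fun acc s => max acc (pvPrio s)) 0
      = if ∃ s ∈ l, pvPrio s = 2 then 2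
        else if ∃ s ∈ l, pvPrio s = 1 then 1 else 0 := by
  induction l with
  | nil => simp
  | cons x xs ih =>
    have hb : pvPrio x ≤ 2 := by unfold pvPrio; split_ifs <;> omega
    simp only [List.foldl_cons, pv_fold_seed, ih]
    simp only [pv_exists_cons]
    have hv : pvPrio x = 0 ∨ pvPrio x = 1 ∨ pvPrio x = 2 := by
      unfold pvPrio; split_ifs <;> simp
    rcases hv with hv | hv | hv <;>
      by_cases e2 : ∃ s ∈ xs, pvPrio s = 2 <;> by_cases e1 : ∃ s ∈ xs, pvPrio s = 1 <;>
        simp [hv, e2, e1]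

-- ===== VERDICT (by name: the statement is the Claim_ definition above) =====
theorem format_last_mar_py_spec : Claim_equal_format_last_mar_py := by
  intro meds _
  unfold Spec_format_last_mar_py format_last_mar_py format_last_mar_py_alt
  by_cases hnil : meds = []
  · simp [hnil]
  · simp only [hnil, ite_false]
    rw [show meds.foldl (fun acc m => max acc (pvPrio (pvStatus m))) 0
        = (meds.map pvStatus).foldl (fun acc s => max acc (pvPrio s)) 0 by
      simp [List.foldl_map]]
    set l := meds.map pvStatus with hl
    rw [pv_fold_char]
    by_cases h2 : ∃ s ∈ l, pvPrio s = 2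
    · have hm2 : "delayed" ∈ l ∨ "refused" ∈ l := by
        obtain ⟨s, hs, hp⟩ := h2
        rcases (pv_prio_two s).1 hp with h | h
        · exact Or.inl (h ▸ hs)
        · exact Or.inr (h ▸ hs)
      rcases hm2 with h | h <;> simp [h, h2]
    · have hnd : "delayed" ∉ l := fun hm => h2 ⟨_, hm, (pv_prio_two _).2 (Or.inl rfl)⟩
      have hnr : "refused" ∉ l := fun hm => h2 ⟨_, hm, (pv_prio_two _).2 (Or.inr rfl)⟩
      by_cases h1 : ∃ s ∈ l, pvPrio s = 1
      · have hm1 : "due" ∈ l ∨ "pending" ∈ l := by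
          obtain ⟨s, hs, hp⟩ := h1
          rcases (pv_prio_one s).1 hp with h | h
          · exact Or.inl (h ▸ hs)
          · exact Or.inr (h ▸ hs)
        rcases hm1 with h | h <;> simp [h, h2, h1, hnd, hnr]
      · have hnu : "due" ∉ l := fun hm => h1 ⟨_, hm, (pv_prio_one _).2 (Or.inl rfl)⟩
        have hnp : "pending" ∉ l := fun hm => h1 ⟨_, hm, (pv_prio_one _).2 (Or.inr rfl)⟩
        simp [h2, h1, hnd, hnr, hnu, hnp]
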